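-- pv_equiv track=rewrite | github.com/Darmo117/Codewars | Completed/Delta Generators/solution.py | delta
-- ===== SOURCE A (Python) =====
-- def delta(values, n: int):
--     sentinel = object()
--     iter_ = iter(values)
--     diffs = [[] for _ in range(n + 1)]
--     while (v := next(iter_, sentinel)) is not sentinel:
--         diffs[0].append(v)
--         for i in range(1, n + 1):
--             if len(diffs[i - 1]) > 1:
--                 diffs[i].append(diffs[i - 1][-1] - diffs[i - 1][-2])
--         if diffs[-1]:
--             yield diffs[-1][-1]
-- ===== SOURCE B (Python) =====
-- def delta(values, n: int):
--     # Difference the whole stream n times with successive adjacent-difference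
--     # passes, then emit every value of the final pass.
--     seq = list(values)
--     for _ in range(n):
--         seq = [b - a for a, b in zip(seq, seq[1:])]
--     yield from seq
-- ===== Notes on version B (the rewrite author's own statement) =====
-- stated objective: simpler
-- what changed: B discards A's streaming (n+1)-row difference table (one incremental row per order, updated value by value in an interpreted inner loop) and instead applies n whole-list adjacent-difference passes (seq = [b - a for a, b in zip(seq, seq[1:])]) and emits the final pass.
import Mathlib
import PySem

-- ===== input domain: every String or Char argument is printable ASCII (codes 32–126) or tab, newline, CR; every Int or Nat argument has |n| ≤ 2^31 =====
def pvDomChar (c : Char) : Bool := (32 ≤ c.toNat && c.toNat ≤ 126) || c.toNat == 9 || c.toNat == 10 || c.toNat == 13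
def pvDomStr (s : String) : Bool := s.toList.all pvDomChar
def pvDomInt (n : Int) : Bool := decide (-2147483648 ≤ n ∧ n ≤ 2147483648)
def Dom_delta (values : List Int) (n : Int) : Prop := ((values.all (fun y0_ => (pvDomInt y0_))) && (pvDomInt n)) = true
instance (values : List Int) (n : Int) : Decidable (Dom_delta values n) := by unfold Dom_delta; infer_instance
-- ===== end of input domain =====

-- B replaces A's streaming (n+1)-row difference table with n whole-list adjacent-difference
-- passes followed by emitting the final pass (objective: simpler).

-- ===== PORT A =====
-- the 'for i in range(1, n + 1)' loop over the difference table
def deltaInner (n : Int) (diffs0 : List (List Int)) : List (List Int) :=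
  (PySem.List.pyRange 1 (n + 1) 1).foldl (fun ds i =>
    let prev := ds.getD (i - 1).toNat []   -- diffs[i - 1]; i ≥ 1 here, so plain Nat indexing is exact
    if prev.length > 1 then
      ds.set i.toNat ((ds.getD i.toNat []) ++
        [(PySem.List.pyGet? prev (-1)).getD 0 - (PySem.List.pyGet? prev (-2)).getD 0])
    else ds) diffs0

-- one iteration of A's while loop: append v to diffs[0], run the inner loop, yield if diffs[-1] non-empty
def deltaStep (n : Int) (st : List (List Int) × List Int) (v : Int) : List (List Int) × List Int :=
  let diffs := deltaInner n (st.1.set 0 ((st.1.getD 0 []) ++ [v]))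
  let lastL := (PySem.List.pyGet? diffs (-1)).getD []
  (diffs, if lastL.isEmpty then st.2 else st.2 ++ [(PySem.List.pyGet? lastL (-1)).getD 0])

def delta (values : List Int) (n : Int) : List Int :=
  (values.foldl (deltaStep n) ((PySem.List.pyRange 0 (n + 1) 1).map (fun _ => ([] : List Int)), [])).2

-- ===== PORT B =====
-- 'seq = [b - a for a, b in zip(seq, seq[1:])]' repeated n times; seq[1:] = drop 1 (exact for this nonnegative slice)
def delta_alt (values : List Int) (n : Int) : List Int :=
  (PySem.List.pyRange 0 n 1).foldl
    (fun seq _ => (seq.zip (seq.drop 1)).map (fun ab => ab.2 - ab.1)) values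

-- ===== PRECONDITION & SPEC =====
-- Pre_ excludes n < 0 with non-empty values, where A raises IndexError (diffs is empty) on the first value.
def Pre_delta (values : List Int) (n : Int) : Prop := 0 ≤ n ∨ values = []
instance (values : List Int) (n : Int) : Decidable (Pre_delta values n) := by unfold Pre_delta; infer_instance
def pvWitness_delta : List Int × Int := ([1, 4, 9, 16], 2)

def Spec_delta (values : List Int) (n : Int) (out : List Int) : Prop := out = delta_alt values n
instance (values : List Int) (n : Int) (out : List Int) : Decidable (Spec_delta values n out) := by unfold Spec_delta; infer_instance

-- ===== CLAIM (what is proved, stated in full; the proofs are below) =====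
def Claim_equal_delta : Prop := ∀ (values : List Int) (n : Int), Dom_delta values n → Pre_delta values n → Spec_delta values n (delta values n)

-- ===== LEMMAS AND PROOFS =====

-- one adjacent-difference pass (the body of B's loop)
def dstep (xs : List Int) : List Int := (xs.zip (xs.drop 1)).map (fun ab => ab.2 - ab.1)

-- Python's xs[-1] with default 0
def lastD (xs : List Int) : Int := xs.getLast?.getD 0

-- the full difference table after A has consumed p: row i is dstep^[i] p
def table (m : Nat) (p : List Int) : List (List Int) :=
  (List.range (m + 1)).map (fun i => dstep^[i] p)

-- the table in the middle of A's inner loop: rows 0..j already advanced to p ++ [v]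
def mixed (m j : Nat) (p : List Int) (v : Int) : List (List Int) :=
  (List.range (m + 1)).map (fun k => if k ≤ j then dstep^[k] (p ++ [v]) else dstep^[k] p)

theorem dstep_nil : dstep [] = [] := rfl

theorem dstep_cons_cons (a b : Int) (l : List Int) :
    dstep (a :: b :: l) = (b - a) :: dstep (b :: l) := rfl

theorem length_dstep (xs : List Int) : (dstep xs).length = xs.length - 1 := by
  simp [dstep]

theorem iter_nil : ∀ i, dstep^[i] ([] : List Int) = [] := by
  intro i
  induction i with
  | zero => rfl
  | succ i ih => rw [Function.iterate_succ_apply', ih, dstep_nil]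

theorem length_iter (i : Nat) (xs : List Int) : (dstep^[i] xs).length = xs.length - i := by
  induction i with
  | zero => simp
  | succ i ih => rw [Function.iterate_succ_apply', length_dstep, ih]; omega

theorem iter_ne_nil (i : Nat) (xs : List Int) (h : i < xs.length) : dstep^[i] xs ≠ [] := by
  apply List.length_pos_iff.mp
  rw [length_iter]
  omega

theorem iter_eq_nil (i : Nat) (xs : List Int) (h : xs.length ≤ i) : dstep^[i] xs = [] := by
  apply List.length_eq_zero_iff.mp
  rw [length_iter]
  omega

theorem lastD_concat (xs : List Int) (x : Int) : lastD (xs ++ [x]) = x := by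
  simp [lastD]

theorem lastD_cons_cons (a b : Int) (l : List Int) : lastD (a :: b :: l) = lastD (b :: l) := by
  simp [lastD, List.getLast?_cons_cons]

theorem pyGet_neg1_getD (xs : List Int) : (PySem.List.pyGet? xs (-1)).getD 0 = lastD xs := by
  rw [PySem.List.pyGet?_neg_one]; rfl

theorem dstep_concat (xs : List Int) (x : Int) (h : xs ≠ []) :
    dstep (xs ++ [x]) = dstep xs ++ [x - lastD xs] := by
  induction xs with
  | nil => exact absurd rfl h
  | cons a l ih =>
    cases l with
    | nil => simp [dstep, lastD]
    | cons b l' =>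
      have ih' := ih (by simp)
      show dstep (a :: b :: (l' ++ [x])) = _
      rw [dstep_cons_cons]
      rw [show (b : Int) :: (l' ++ [x]) = (b :: l') ++ [x] from rfl, ih',
        dstep_cons_cons, lastD_cons_cons]
      simp

theorem iter_concat (i : Nat) (xs : List Int) (x : Int) (h : i ≤ xs.length) :
    dstep^[i] (xs ++ [x]) = dstep^[i] xs ++ [lastD (dstep^[i] (xs ++ [x]))] := by
  induction i with
  | zero => simp [lastD_concat]
  | succ i ih =>
    have hi : i ≤ xs.length := by omega
    have hq : dstep^[i] xs ≠ [] := iter_ne_nil i xs (by omega)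
    have key : dstep^[i+1] (xs ++ [x])
        = dstep^[i+1] xs ++ [lastD (dstep^[i] (xs ++ [x])) - lastD (dstep^[i] xs)] := by
      conv_lhs => rw [Function.iterate_succ_apply', ih hi, dstep_concat _ _ hq]
      rw [← Function.iterate_succ_apply' dstep i xs]
    rw [key, lastD_concat]

-- the value A reads as prev[-2] after the row has just been extended
theorem pyGet_neg2_concat (q : List Int) (e : Int) (hq : q ≠ []) :
    (PySem.List.pyGet? (q ++ [e]) (-2)).getD 0 = lastD q := by
  have hql : 0 < q.length := List.length_pos_iff.mpr hq
  have hlen : 2 ≤ (q ++ [e]).length := by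
    simp only [List.length_append, List.length_cons, List.length_nil]; omega
  have h := PySem.List.pyGet?_neg_natCast (xs := q ++ [e]) (k := 2) (by omega) hlen
  rw [show (-(((2:Nat)):Int)) = (-2 : Int) from by norm_num] at h
  rw [h, show (q ++ [e]).length - 2 = q.length - 1 from by
      simp only [List.length_append, List.length_cons, List.length_nil]; omega,
    List.getElem?_append_left (by omega)]
  simp [lastD, List.getLast?_eq_getElem?]

theorem set_map_range {α : Type} (f : Nat → α) (m j : Nat) (hj : j < m) (a : α) :
    ((List.range m).map f).set j a = (List.range m).map (fun k => if k = j then a else f k) := by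
  apply List.ext_getElem
  · simp
  · intro k h1 h2
    simp only [List.length_set, List.length_map, List.length_range] at h1
    rw [List.getElem_set]
    simp only [List.getElem_map, List.getElem_range]
    rcases eq_or_ne j k with h | h
    · subst h; simp
    · rw [if_neg h, if_neg (fun hh => h hh.symm)]

theorem getD_map_range' {α : Type} (f : Nat → α) (m k : Nat) (d : α) (hk : k < m) :
    ((List.range m).map f).getD k d = f k := by
  rw [List.getD_eq_getElem?_getD]
  simp [hk]

theorem mixed_getD (m j k : Nat) (p : List Int) (v : Int) (hk : k < m + 1) :
    (mixed m j p v).getD k [] = if k ≤ j then dstep^[k] (p ++ [v]) else dstep^[k] p := by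
  unfold mixed
  rw [getD_map_range' _ _ _ _ hk]

-- core step of A's inner loop: processing index j+1 advances row j+1
theorem inner_step (m j : Nat) (p : List Int) (v : Int) (_hj : j + 1 ≤ m) :
    (if ((mixed m j p v).getD (((j : Int) + 1) - 1).toNat []).length > 1 then
      (mixed m j p v).set ((j : Int) + 1).toNat ((mixed m j p v).getD ((j : Int) + 1).toNat [] ++
        [(PySem.List.pyGet? ((mixed m j p v).getD (((j : Int) + 1) - 1).toNat []) (-1)).getD 0
          - (PySem.List.pyGet? ((mixed m j p v).getD (((j : Int) + 1) - 1).toNat []) (-2)).getD 0])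
    else mixed m j p v) = mixed m (j + 1) p v := by
  have e1 : (((j : Int) + 1) - 1).toNat = j := by omega
  have e2 : ((j : Int) + 1).toNat = j + 1 := by omega
  rw [e1, e2, mixed_getD m j j p v (by omega), if_pos (le_refl j),
    mixed_getD m j (j+1) p v (by omega), if_neg (show ¬((j+1 : Nat) ≤ j) from by omega)]
  have hlen : (dstep^[j] (p ++ [v])).length = p.length + 1 - j := by
    rw [length_iter]; simp
  by_cases hc : j + 1 ≤ p.length
  · have hguard : (dstep^[j] (p ++ [v])).length > 1 := by omega
    rw [if_pos hguard]
    have hqne : dstep^[j] p ≠ [] := iter_ne_nil j p (by omega)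
    have hcon := iter_concat j p v (by omega)
    have hv2 : (PySem.List.pyGet? (dstep^[j] (p ++ [v])) (-2)).getD 0 = lastD (dstep^[j] p) := by
      conv_lhs => rw [hcon]
      exact pyGet_neg2_concat _ _ hqne
    rw [pyGet_neg1_getD, hv2]
    have hrow : dstep^[j+1] (p ++ [v])
        = dstep^[j+1] p ++ [lastD (dstep^[j] (p ++ [v])) - lastD (dstep^[j] p)] := by
      rw [Function.iterate_succ_apply' dstep j (p ++ [v])]
      conv_lhs => rw [hcon]
      rw [dstep_concat _ _ hqne, ← Function.iterate_succ_apply' dstep j p]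
    unfold mixed
    rw [set_map_range _ (m+1) (j+1) (by omega)]
    apply List.map_congr_left
    intro k hk
    simp only [List.mem_range] at hk
    rcases eq_or_ne k (j+1) with hkj | hkj
    · subst hkj
      rw [if_pos rfl, if_pos (le_refl _), hrow]
    · rw [if_neg hkj]
      by_cases hk2 : k ≤ j
      · rw [if_pos hk2, if_pos (by omega)]
      · rw [if_neg hk2, if_neg (by omega)]
  · have hguard : ¬ ((dstep^[j] (p ++ [v])).length > 1) := by omega
    rw [if_neg hguard]
    unfold mixed
    apply List.map_congr_left
    intro k hk
    simp only [List.mem_range] at hk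
    by_cases hk2 : k ≤ j
    · rw [if_pos hk2, if_pos (by omega)]
    · by_cases hk3 : k ≤ j + 1
      · have hke : k = j + 1 := by omega
        subst hke
        rw [if_neg hk2, if_pos hk3, iter_eq_nil (j+1) p (by omega),
          iter_eq_nil (j+1) (p ++ [v]) (by simp only [List.length_append, List.length_cons, List.length_nil]; omega)]
      · rw [if_neg hk2, if_neg hk3]

theorem inner_inv (m : Nat) (p : List Int) (v : Int) :
    ∀ j, j ≤ m → (PySem.List.pyRange 1 ((j : Int) + 1) 1).foldl (fun ds i =>
      let prev := ds.getD (i - 1).toNat []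
      if prev.length > 1 then
        ds.set i.toNat ((ds.getD i.toNat []) ++
          [(PySem.List.pyGet? prev (-1)).getD 0 - (PySem.List.pyGet? prev (-2)).getD 0])
      else ds) (mixed m 0 p v) = mixed m j p v := by
  intro j
  induction j with
  | zero => intro _; rw [PySem.List.pyRange_one_eq_nil (by omega)]; rfl
  | succ j ih =>
    intro hj
    have hcast : ((j + 1 : Nat) : Int) + 1 = ((j : Int) + 1) + 1 := by push_cast; ring
    rw [hcast, PySem.List.pyRange_one_succ_right (by omega), List.foldl_append, ih (by omega)]
    simp only [List.foldl_cons, List.foldl_nil]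
    exact inner_step m j p v hj

theorem mixed_last (m : Nat) (p : List Int) (v : Int) :
    mixed m m p v = table m (p ++ [v]) := by
  unfold mixed table
  apply List.map_congr_left
  intro k hk
  simp only [List.mem_range] at hk
  simp [Nat.le_of_lt_succ hk]

theorem table_set0 (m : Nat) (p : List Int) (v : Int) :
    (table m p).set 0 (((table m p).getD 0 []) ++ [v]) = mixed m 0 p v := by
  unfold table mixed
  rw [getD_map_range' _ _ _ _ (by omega), set_map_range _ _ _ (by omega)]
  apply List.map_congr_left
  intro k _
  by_cases h : k = 0 <;> simp [h]

theorem table_getLast (m : Nat) (p : List Int) :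
    (PySem.List.pyGet? (table m p) (-1)).getD [] = dstep^[m] p := by
  rw [PySem.List.pyGet?_neg_one]
  unfold table
  rw [List.range_succ, List.map_append]
  simp

theorem deltaStep_spec (m : Nat) (p : List Int) (v : Int) :
    deltaStep (m : Int) (table m p, dstep^[m] p) v = (table m (p ++ [v]), dstep^[m] (p ++ [v])) := by
  unfold deltaStep deltaInner
  simp only
  rw [table_set0, inner_inv m p v m (le_refl m), mixed_last, table_getLast]
  simp only [Prod.mk.injEq, true_and]
  by_cases hc : m ≤ p.length
  · have hne : dstep^[m] (p ++ [v]) ≠ [] := iter_ne_nil m (p ++ [v]) (by simp only [List.length_append, List.length_cons, List.length_nil]; omega)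
    rw [if_neg (by simpa using hne), pyGet_neg1_getD]
    exact (iter_concat m p v hc).symm
  · rw [iter_eq_nil m (p ++ [v]) (by simp only [List.length_append, List.length_cons, List.length_nil]; omega), iter_eq_nil m p (by omega)]
    simp

theorem fold_inv (m : Nat) :
    ∀ (rest p : List Int),
      rest.foldl (deltaStep (m : Int)) (table m p, dstep^[m] p)
        = (table m (p ++ rest), dstep^[m] (p ++ rest)) := by
  intro rest
  induction rest with
  | nil => intro p; simp
  | cons v rest' ih =>
    intro p
    rw [List.foldl_cons, deltaStep_spec, ih (p ++ [v])]
    simp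

theorem table_nil (n : Int) (hn : 0 ≤ n) :
    (PySem.List.pyRange 0 (n + 1) 1).map (fun _ => ([] : List Int)) = table n.toNat [] := by
  unfold table
  rw [PySem.List.pyRange_one, List.map_map]
  rw [show (n + 1 - 0).toNat = n.toNat + 1 from by omega]
  apply List.map_congr_left
  intro k _
  simp [iter_nil]

theorem fold_inv_nil (m : Nat) (values : List Int) :
    (values.foldl (deltaStep (m : Int)) (table m [], [])).2 = dstep^[m] values := by
  have h0 : ((table m [], ([] : List Int)) : List (List Int) × List Int)
      = (table m [], dstep^[m] []) := by rw [iter_nil]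
  rw [h0, fold_inv m values []]
  simp

theorem A_char (values : List Int) (n : Int) (hn : 0 ≤ n) :
    delta values n = dstep^[n.toNat] values := by
  obtain ⟨m, rfl⟩ : ∃ m : Nat, n = (m : Int) := ⟨n.toNat, by omega⟩
  unfold delta
  rw [table_nil _ (by positivity)]
  simp only [Int.toNat_natCast]
  exact fold_inv_nil m values

theorem foldl_const_iter (l : List Int) : ∀ (xs : List Int),
    l.foldl (fun s _ => dstep s) xs = dstep^[l.length] xs := by
  induction l with
  | nil => intro xs; rfl
  | cons a l' ih =>
    intro xs
    rw [List.foldl_cons, ih, List.length_cons,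
      ← Function.iterate_succ_apply dstep l'.length xs]

theorem B_char (values : List Int) (n : Int) :
    delta_alt values n = dstep^[n.toNat] values := by
  unfold delta_alt
  rw [show (fun (seq : List Int) (_ : Int) => (seq.zip (seq.drop 1)).map (fun ab => ab.2 - ab.1))
      = (fun (s : List Int) (_ : Int) => dstep s) from rfl]
  rw [foldl_const_iter, PySem.List.length_pyRange_one]
  simp

-- ===== VERDICT (by name: the statement is the Claim_ definition above) =====
theorem delta_spec : Claim_equal_delta := by
  intro values n _ hpre
  unfold Spec_delta
  rcases hpre with hn | hv
  · rw [A_char values n hn, B_char]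
  · subst hv
    rw [B_char, iter_nil]
    rfl
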